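-- pv_equiv track=rewrite | github.com/EliasAroni2000/automatas | Aroni-tp1-v2.py | tokenMayorIgual
-- ===== SOURCE A (Python) =====
-- estado_final = "estado final"
--
-- estadoNoFinal = "estado no aceptado"
--
-- estadoTrampa = "estado trampa"
--
-- def tokenMayorIgual(lexema):
--     estado = 0
--     estadoFinal = [2]
--     caracter = {0:{'>':1},1:{'=':2},2:{}}
--     for c in lexema:
--         if c in caracter[estado]:
--             estado = caracter[estado][c]
--         else:
--             estado = -1
--             break
--     if estado == -1:
--         return estadoTrampa
--     if estado in estadoFinal:
--         return estado_final
--     else: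
--         return estadoNoFinal
-- ===== SOURCE B (Python) =====
-- estado_final = "estado final"
-- estadoNoFinal = "estado no aceptado"
-- estadoTrampa = "estado trampa"
--
-- def tokenMayorIgual(lexema):
--     # closed-form: no state loop, just compare against ">="
--     if lexema == ">=":
--         return estado_final
--     if ">=".startswith(lexema):
--         return estadoNoFinal
--     return estadoTrampa
-- ===== Notes on version B (the rewrite author's own statement) =====
-- stated objective: simpler
-- what changed: Replaced the DFA state loop with a transition dict by a closed-form comparison against the two-character token: exact match is the final state, a proper prefix is the non-accepted state, anything else is the trap state.
import Mathlib
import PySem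

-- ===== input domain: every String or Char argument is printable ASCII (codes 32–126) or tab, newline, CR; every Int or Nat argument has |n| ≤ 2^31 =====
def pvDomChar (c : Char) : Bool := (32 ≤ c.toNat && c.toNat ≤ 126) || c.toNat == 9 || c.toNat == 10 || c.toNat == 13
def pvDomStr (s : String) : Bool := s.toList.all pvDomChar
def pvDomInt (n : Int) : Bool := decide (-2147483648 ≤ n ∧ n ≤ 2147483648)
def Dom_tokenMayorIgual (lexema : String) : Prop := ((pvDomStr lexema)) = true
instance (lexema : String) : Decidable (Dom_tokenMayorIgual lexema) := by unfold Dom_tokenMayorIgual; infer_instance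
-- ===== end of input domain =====

-- B replaces A's DFA state loop with a closed-form comparison of the whole string against ">=" (simpler).


-- ===== PORT A =====
-- the dict caracter = {0:{'>':1},1:{'=':2},2:{}} as a lookup: membership test + value
def caracterStep (estado : Int) (c : Char) : Option Int :=
  if estado = 0 then (if c = '>' then some 1 else none)
  else if estado = 1 then (if c = '=' then some 2 else none)
  else none

-- the for-loop with break: estado ← transition, or -1 and stop
def tokenLoop (cs : List Char) (estado : Int) : Int :=
  match cs with
  | [] => estado
  | c :: rest =>
    match caracterStep estado c with
    | some e' => tokenLoop rest e'
    | none => -1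

def tokenMayorIgual (lexema : String) : String :=
  let estado := tokenLoop lexema.toList 0
  if estado = -1 then "estado trampa"
  else if estado ∈ [(2 : Int)] then "estado final"
  else "estado no aceptado"

-- ===== PORT B =====
def tokenMayorIgual_alt (lexema : String) : String :=
  if lexema = ">=" then "estado final"
  else if PySem.Str.startswith ">=" lexema then "estado no aceptado"
  else "estado trampa"

-- ===== PRECONDITION & SPEC =====
def Spec_tokenMayorIgual (lexema : String) (out : String) : Prop := out = tokenMayorIgual_alt lexema
instance (lexema : String) (out : String) : Decidable (Spec_tokenMayorIgual lexema out) := by unfold Spec_tokenMayorIgual; infer_instance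

-- ===== CLAIM (what is proved, stated in full; the proofs are below) =====
def Claim_equal_tokenMayorIgual : Prop := ∀ (lexema : String), Dom_tokenMayorIgual lexema → Spec_tokenMayorIgual lexema (tokenMayorIgual lexema)

-- ===== LEMMAS AND PROOFS =====

theorem startswith_geq (lexema : String) :
    PySem.Str.startswith ">=" lexema = true ↔ lexema.toList <+: ['>', '='] := by
  have h := PySem.Chars.startswith_iff (">=".toList) lexema.toList
  rw [show (">=".toList) = ['>', '='] from rfl] at h
  rw [show PySem.Str.startswith ">=" lexema
        = PySem.Chars.startswith ['>', '='] lexema.toList from by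
      simp [PySem.Str.startswith_eq]]
  exact h

theorem tokenLoop_char (l : List Char) :
    tokenLoop l 0 = (match l with
      | [] => 0
      | ['>'] => 1
      | '>' :: '=' :: rest => if rest = [] then 2 else -1
      | _ => -1) := by
  match l with
  | [] => rfl
  | [c] =>
    by_cases h : c = '>' <;> simp [tokenLoop, caracterStep, h]
  | c :: d :: rest =>
    by_cases h : c = '>'
    · by_cases h2 : d = '='
      · subst h h2
        cases rest with
        | nil => rfl
        | cons e rest' => simp [tokenLoop, caracterStep]
      · simp [tokenLoop, caracterStep, h, h2]
    · simp [tokenLoop, caracterStep, h]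

theorem toList_inj {s t : String} (h : s.toList = t.toList) : s = t := by
  have := congrArg String.ofList h
  simpa using this

-- ===== VERDICT (by name: the statement is the Claim_ definition above) =====
theorem tokenMayorIgual_spec : Claim_equal_tokenMayorIgual := by
  intro lexema _
  unfold Spec_tokenMayorIgual tokenMayorIgual tokenMayorIgual_alt
  have hsw := startswith_geq lexema
  have hloop := tokenLoop_char lexema.toList
  have heq : (lexema = ">=") ↔ lexema.toList = ['>', '='] :=
    ⟨fun h => by simp [h], fun h => toList_inj (by simpa using h)⟩
  rcases hl : lexema.toList with _ | ⟨c, _ | ⟨d, rest⟩⟩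
  · rw [hl] at hloop heq hsw
    simp_all
  · rw [hl] at hloop heq hsw
    by_cases hc : c = '>' <;>
      simp_all [List.cons_prefix_cons]
  · rw [hl] at hloop heq hsw
    by_cases hc : c = '>'
    · by_cases hd : d = '='
      · subst hc hd
        cases rest with
        | nil => simp_all
        | cons e rest' => simp_all [List.cons_prefix_cons]
      · simp_all [List.cons_prefix_cons]
    · simp_all [List.cons_prefix_cons]
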